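-- pv_equiv track=rewrite | github.com/chlendyd7/Algorithm | 리뉴얼/2024/프로그래머스/12/fifth/29/new/억억단을외자.py | solution
-- ===== SOURCE A (Python) =====
-- def solution(e, starts):
--     cnt = [1]*(e+1)
--     for num in range(1,e+1):
--         for increment in range(num*2,e+1,num):
--             cnt[increment]+=1
-- # -------------------
--
--     # dp[n] : [n,e] 구간의 최댓값의 idx(=가장 큰 약수의 개수의 idx)
--     dp = [0] *(e+1)
--     dp[e] = e
--     maxVal = cnt[e]
--     for i in reversed(range(1,e)):
--         # cnt[i]의 값이 [i+1,e]의 최댓값보다 큰 경우(= 더 많이 등장한 경우)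
--         if cnt[i] >= cnt[dp[i+1]]:
--             dp[i] = i
--         else:
--             dp[i] = dp[i+1]
--
--     answer = []
--     for start in starts:
--         answer.append(dp[start])
--     return answer
-- ===== SOURCE B (Python) =====
-- def solution(e, starts):
--     # divisor counts via a smallest-prime-factor table + factorization
--     spf = [0] * (e + 1)
--     for i in range(2, e + 1):
--         for j in range(i, e + 1, i):
--             if spf[j] == 0:
--                 spf[j] = i
--     cnt = [1] * (e + 1)
--     for n in range(2, e + 1):
--         m = n
--         c = 1
--         while m > 1:
--             p = spf[m]
--             k = 0
--             while m % p == 0: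
--                 m //= p
--                 k += 1
--             c *= k + 1
--         cnt[n] = c
--     # suffix argmax with a running best index (leftmost on ties via >=)
--     dp = [0] * (e + 1)
--     dp[e] = e
--     best = e
--     for i in range(e - 1, 0, -1):
--         if cnt[i] >= cnt[best]:
--             best = i
--         dp[i] = best
--     return [dp[start] for start in starts]
-- ===== Notes on version B (the rewrite author's own statement) =====
-- stated objective: alternative
-- what changed: The harmonic divisor-count sieve (adding 1 to every multiple of every number) is replaced by a smallest-prime-factor sieve followed by per-number factorization (cnt[n] = product of exponent+1), and the self-referencing suffix dp recurrence dp[i]=i or dp[i+1] is replaced by a running best-index scan.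
import Mathlib
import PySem

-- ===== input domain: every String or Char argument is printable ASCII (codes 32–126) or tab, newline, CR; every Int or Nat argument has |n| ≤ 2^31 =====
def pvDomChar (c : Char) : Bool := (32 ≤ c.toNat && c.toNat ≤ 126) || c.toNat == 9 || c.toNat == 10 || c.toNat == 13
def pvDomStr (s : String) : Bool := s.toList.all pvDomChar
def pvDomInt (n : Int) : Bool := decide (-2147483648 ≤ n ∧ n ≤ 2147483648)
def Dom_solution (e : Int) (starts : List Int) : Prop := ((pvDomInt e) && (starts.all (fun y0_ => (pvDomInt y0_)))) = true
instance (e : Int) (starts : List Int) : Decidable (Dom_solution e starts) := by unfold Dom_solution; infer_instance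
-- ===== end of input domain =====

-- B replaces A's harmonic divisor-count sieve by a smallest-prime-factor sieve plus per-number
-- factorization, and A's suffix-argmax dp recurrence by a running-best scan (objective: alternative).

-- ===== PORT A =====
-- phase 1: cnt[increment] += 1 over multiples (pySetD/pyGetD are Python-exact on the in-range indices used)
def pvCntA (e : Int) : List Int :=
  (PySem.List.pyRange 1 (e+1) 1).foldl
    (fun cnt num => (PySem.List.pyRange (num*2) (e+1) num).foldl
        (fun c inc => PySem.List.pySetD c inc (PySem.List.pyGetD c inc 0 + 1)) cnt)
    (List.replicate (e+1).toNat 1)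

-- phase 2: dp[i] = i if cnt[i] >= cnt[dp[i+1]] else dp[i+1]  (the Python's `maxVal` is never read)
def pvDpA (e : Int) (cnt : List Int) : List Int :=
  (PySem.List.pyRange (e-1) 0 (-1)).foldl
    (fun dp i =>
      if PySem.List.pyGetD cnt i 0 ≥ PySem.List.pyGetD cnt (PySem.List.pyGetD dp (i+1) 0) 0 then
        PySem.List.pySetD dp i i
      else PySem.List.pySetD dp i (PySem.List.pyGetD dp (i+1) 0))
    (PySem.List.pySetD (List.replicate (e+1).toNat 0) e e)

def solution (e : Int) (starts : List Int) : List Int :=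
  let dp := pvDpA e (pvCntA e)
  starts.foldl (fun acc s => acc ++ [PySem.List.pyGetD dp s 0]) []

-- ===== PORT B =====
-- spf[j] = smallest i in [2,e] dividing j (0 while unmarked), built by marking still-unmarked multiples
def pvSpf (e : Int) : List Int :=
  (PySem.List.pyRange 2 (e+1) 1).foldl
    (fun spf i => (PySem.List.pyRange i (e+1) i).foldl
        (fun spf j => if PySem.List.pyGetD spf j 0 = 0 then PySem.List.pySetD spf j i else spf) spf)
    (List.replicate (e+1).toNat 0)

-- inner `while m % p == 0: m //= p; k += 1` (fuel-totalised; fuel never runs out for p = spf[m] >= 2)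
def pvStrip (p : Int) : Nat → Int × Int → Int × Int
  | 0, km => km
  | fuel+1, (k, m) =>
      if PySem.Int.mod m p = 0 then pvStrip p fuel (k+1, PySem.Int.floordiv m p) else (k, m)

-- outer `while m > 1: p = spf[m]; k = strip; c *= k + 1` (fuel-totalised likewise)
def pvFact (spf : List Int) : Nat → Int → Int → Int
  | 0, _, c => c
  | fuel+1, m, c =>
      if 1 < m then
        let km := pvStrip (PySem.List.pyGetD spf m 0) (fuel+1) (0, m)
        pvFact spf fuel km.2 (c * (km.1 + 1))
      else c

def pvCntB (e : Int) : List Int :=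
  (PySem.List.pyRange 2 (e+1) 1).foldl
    (fun cnt n => PySem.List.pySetD cnt n (pvFact (pvSpf e) n.toNat n 1))
    (List.replicate (e+1).toNat 1)

-- running best index (leftmost on ties via >=), dp[i] = best
def pvDpB (e : Int) (cnt : List Int) : Int × List Int :=
  (PySem.List.pyRange (e-1) 0 (-1)).foldl
    (fun bd i =>
      let best := if PySem.List.pyGetD cnt i 0 ≥ PySem.List.pyGetD cnt bd.1 0 then i else bd.1
      (best, PySem.List.pySetD bd.2 i best))
    (e, PySem.List.pySetD (List.replicate (e+1).toNat 0) e e)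

def solution_alt (e : Int) (starts : List Int) : List Int :=
  starts.map (fun s => PySem.List.pyGetD (pvDpB e (pvCntB e)).2 s 0)

-- ===== PRECONDITION & SPEC =====
-- Pre_: exactly the inputs Python A returns on — e >= 0 (else `dp[e] = e` is an IndexError) and every
-- start a valid (possibly negative, Python-style) index into the length-(e+1) table dp.
def Pre_solution (e : Int) (starts : List Int) : Prop :=
  0 ≤ e ∧ ∀ s ∈ starts, -(e+1) ≤ s ∧ s ≤ e
instance (e : Int) (starts : List Int) : Decidable (Pre_solution e starts) := by
  unfold Pre_solution; infer_instance

def pvWitness_solution : Int × List Int := (6, [1, 3, 6, -1])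

def Spec_solution (e : Int) (starts : List Int) (out : List Int) : Prop := out = solution_alt e starts
instance (e : Int) (starts : List Int) (out : List Int) : Decidable (Spec_solution e starts out) := by
  unfold Spec_solution; infer_instance

-- ===== CLAIM (what is proved, stated in full; the proofs are below) =====
def Claim_equal_solution : Prop := ∀ (e : Int) (starts : List Int), Dom_solution e starts → Pre_solution e starts → Spec_solution e starts (solution e starts)

-- ===== LEMMAS AND PROOFS =====

-- generic: a length-preserving fold preserves length
lemma pv_foldl_len {α β : Type} (step : List α → β → List α)
    (h : ∀ s x, (step s x).length = s.length) :
    ∀ (l : List β) (s : List α), (l.foldl step s).length = s.length := by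
  intro l
  induction l with
  | nil => intro s; rfl
  | cons x xs ih => intro s; rw [List.foldl_cons, ih, h]

-- read-after-write for Int indices (total pyGetD/pySetD, nonnegative indices)
lemma pv_getD_setD (c : List Int) (i q v : Int) (hi : 0 ≤ i) (hq : 0 ≤ q) :
    PySem.List.pyGetD (PySem.List.pySetD c i v) q 0 =
      if q = i ∧ i < (c.length : Int) then v else PySem.List.pyGetD c q 0 := by
  rw [PySem.List.pySetD_of_nonneg _ _ hi, PySem.List.pyGetD_of_nonneg _ _ hq,
      PySem.List.pyGetD_of_nonneg _ _ hq]
  simp only [List.getD_eq_getElem?_getD, List.getElem?_set]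
  by_cases h1 : q = i
  · subst h1
    by_cases h2 : q < (c.length : Int)
    · have hn : q.toNat < c.length := by omega
      simp [hn, h2]
    · have hn : ¬ q.toNat < c.length := by omega
      simp [hn, h2]
  · have hn : i.toNat ≠ q.toNat := by omega
    simp [hn, h1]

lemma pv_getD_replicate (n : Nat) (a : Int) (q : Int) (hq : 0 ≤ q) :
    PySem.List.pyGetD (List.replicate n a) q 0 = if q < (n : Int) then a else 0 := by
  rw [PySem.List.pyGetD_of_nonneg _ _ hq]
  by_cases h : q < (n : Int)
  · have hn : q.toNat < n := by omega
    rw [if_pos h]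
    simp [List.getD_eq_getElem?_getD, hn]
  · have hn : ¬ q.toNat < n := by omega
    rw [if_neg h]
    simp [List.getD_eq_getElem?_getD, hn]

-- a positive-step range has no duplicates
lemma pv_nodup_pyRange (a b s : Int) (hs : 0 < s) : (PySem.List.pyRange a b s).Nodup := by
  rw [PySem.List.pyRange_of_pos _ _ hs]
  refine List.Nodup.map ?_ (List.nodup_range)
  intro x y h
  have h' : s * (x : Int) = s * (y : Int) := by linarith
  exact_mod_cast mul_left_cancel₀ (by omega : s ≠ 0) h'

lemma pv_count_pyRange (a b s q : Int) (hs : 0 < s) :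
    ((PySem.List.pyRange a b s).count q : Int) =
      if q ∈ PySem.List.pyRange a b s then 1 else 0 := by
  by_cases h : q ∈ PySem.List.pyRange a b s
  · rw [List.count_eq_one_of_mem (pv_nodup_pyRange a b s hs) h, if_pos h]; rfl
  · rw [List.count_eq_zero_of_not_mem h, if_neg h]; rfl

-- elementwise effect of A's inner increment loop
lemma pv_fold_incr (xs : List Int) :
    ∀ (c : List Int) (q : Int), (∀ x ∈ xs, 0 ≤ x) → 0 ≤ q → q < (c.length : Int) →
    PySem.List.pyGetD
        (xs.foldl (fun c inc => PySem.List.pySetD c inc (PySem.List.pyGetD c inc 0 + 1)) c) q 0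
      = PySem.List.pyGetD c q 0 + (xs.count q : Int) := by
  induction xs with
  | nil => intro c q _ _ _; simp [List.count_nil]
  | cons x xs ih =>
    intro c q hx hq hlt
    have hx0 : 0 ≤ x := hx x (by simp)
    rw [List.foldl_cons, ih _ _ (fun y hy => hx y (by simp [hy])) hq
        (by rw [PySem.List.length_pySetD]; exact hlt)]
    rw [pv_getD_setD c x q _ hx0 hq, List.count_cons]
    by_cases hqx : q = x
    · subst hqx
      rw [if_pos (⟨rfl, hlt⟩ : q = q ∧ q < (c.length : Int))]
      simp only [BEq.rfl, if_true]
      push_cast; ring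
    · rw [if_neg (fun h : q = x ∧ x < (c.length : Int) => hqx h.1)]
      have hbeq2 : (x == q) = false := by simp [show x ≠ q from fun h => hqx h.symm]
      simp only [hbeq2, Bool.false_eq_true, if_false]
      push_cast; ring

-- elementwise effect of B's mark-if-unmarked loop
lemma pv_fold_mark (i : Int) (_hi : i ≠ 0) (xs : List Int) :
    ∀ (S : List Int) (q : Int), (∀ x ∈ xs, 0 ≤ x) → 0 ≤ q → q < (S.length : Int) →
    PySem.List.pyGetD
        (xs.foldl (fun s j => if PySem.List.pyGetD s j 0 = 0 then PySem.List.pySetD s j i else s) S) q 0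
      = if PySem.List.pyGetD S q 0 = 0 ∧ q ∈ xs then i else PySem.List.pyGetD S q 0 := by
  induction xs with
  | nil => intro S q _ _ _; simp
  | cons x xs ih =>
    intro S q hx hq hlt
    have hx0 : 0 ≤ x := hx x (by simp)
    rw [List.foldl_cons]
    by_cases hz : PySem.List.pyGetD S x 0 = 0
    · rw [if_pos hz,
        ih _ _ (fun y hy => hx y (by simp [hy])) hq (by rw [PySem.List.length_pySetD]; exact hlt)]
      rw [pv_getD_setD S x q i hx0 hq]
      by_cases hqx : q = x
      · subst hqx
        rw [if_pos (⟨rfl, hlt⟩ : q = q ∧ q < (S.length : Int)), ite_self,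
          if_pos ⟨hz, by simp⟩]
      · rw [if_neg (fun h : q = x ∧ x < (S.length : Int) => hqx h.1)]
        by_cases hm : q ∈ xs
        · simp [hm, List.mem_cons]
        · simp [hm, hqx]
    · rw [if_neg hz, ih _ _ (fun y hy => hx y (by simp [hy])) hq hlt]
      by_cases hq0 : PySem.List.pyGetD S q 0 = 0
      · have hqx : q ≠ x := fun h => hz (h ▸ hq0)
        simp [hq0, List.mem_cons, hqx]
      · simp [hq0]

-- elementwise effect of B's write-f(n)-at-n loop
lemma pv_fold_setf (f : Int → Int) (xs : List Int) :
    ∀ (c : List Int) (q : Int), (∀ x ∈ xs, 0 ≤ x ∧ x < (c.length : Int)) → 0 ≤ q →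
    PySem.List.pyGetD (xs.foldl (fun c n => PySem.List.pySetD c n (f n)) c) q 0
      = if q ∈ xs then f q else PySem.List.pyGetD c q 0 := by
  induction xs with
  | nil => intro c q _ _; simp
  | cons x xs ih =>
    intro c q hx hq
    have hx0 := hx x (by simp)
    rw [List.foldl_cons,
      ih _ _ (fun y hy => by
        rw [PySem.List.length_pySetD]
        exact hx y (by simp [hy])) hq]
    rw [pv_getD_setD c x q _ hx0.1 hq]
    by_cases hmem : q ∈ xs
    · simp [hmem]
    · by_cases hqx : q = x
      · subst hqx
        rw [if_neg hmem, if_pos (⟨rfl, hx0.2⟩ : q = q ∧ q < (c.length : Int))]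
        simp
      · rw [if_neg hmem, if_neg (fun h : q = x ∧ x < (c.length : Int) => hqx h.1)]
        simp [List.mem_cons, hqx, hmem]

-- number of divisors
def pvTau (n : Nat) : Nat := n.divisors.card

lemma pv_tau_eq_proper (J : Nat) (hJ : 1 ≤ J) : pvTau J = J.properDivisors.card + 1 := by
  unfold pvTau
  rw [← Nat.insert_self_properDivisors (by omega : J ≠ 0),
    Finset.card_insert_of_notMem (fun h => absurd (Nat.mem_properDivisors.mp h).2 (lt_irrefl J))]

-- A's sieve predicate equals proper divisorship
lemma pv_two_mul_le_iff (d J : Nat) (hd : 1 ≤ d) (hdvd : d ∣ J) (hJ : 1 ≤ J) :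
    2 * d ≤ J ↔ d < J := by
  obtain ⟨c, rfl⟩ := hdvd
  constructor
  · intro h; omega
  · intro h
    have hc : 2 ≤ c := by
      rcases Nat.lt_or_ge c 2 with hc | hc
      · interval_cases c <;> omega
      · exact hc
    calc 2 * d = d * 2 := by ring
    _ ≤ d * c := Nat.mul_le_mul_left d hc

lemma pv_countP_range (N : Nat) (p : Nat → Bool) :
    (List.range N).countP p = ((Finset.range N).filter (fun k => p k = true)).card := by
  induction N with
  | zero => simp
  | succ n ih =>
    rw [List.range_succ, List.countP_append, Finset.range_add_one, Finset.filter_insert]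
    by_cases h : p n = true
    · rw [if_pos h, Finset.card_insert_of_notMem (by simp)]
      simp [h, ih]
    · rw [if_neg h]
      simp [h, ih]

-- A's cnt characterisation: cnt[q] counts the divisors of q (with cnt[0] = cnt[1] = 1)
lemma pv_cntA_len (e : Int) : (pvCntA e).length = (e+1).toNat := by
  unfold pvCntA
  rw [pv_foldl_len _ (fun s num =>
    pv_foldl_len _ (fun c inc => PySem.List.length_pySetD _ _ _) _ s), List.length_replicate]

lemma pv_cntA_partial (e : Int) (L : List Int) :
    ∀ (c : List Int) (q : Int), (∀ x ∈ L, 1 ≤ x) → 0 ≤ q → q < (c.length : Int) →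
    PySem.List.pyGetD
      (L.foldl (fun cnt num => (PySem.List.pyRange (num*2) (e+1) num).foldl
        (fun c inc => PySem.List.pySetD c inc (PySem.List.pyGetD c inc 0 + 1)) cnt) c) q 0
    = PySem.List.pyGetD c q 0 +
      (L.countP (fun num => decide (q ∈ PySem.List.pyRange (num*2) (e+1) num)) : Int) := by
  induction L with
  | nil => intro c q _ _ _; simp
  | cons x xs ih =>
    intro c q hL hq hlt
    have hx1 : 1 ≤ x := hL x (by simp)
    have hpos : (0:Int) < x := by omega
    have hnn : ∀ z ∈ PySem.List.pyRange (x*2) (e+1) x, 0 ≤ z := by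
      intro z hz
      have := (PySem.List.mem_pyRange_iff_of_pos hpos z).mp hz
      omega
    rw [List.foldl_cons, ih _ _ (fun y hy => hL y (by simp [hy])) hq
        (by rw [pv_foldl_len _ (fun c' inc => PySem.List.length_pySetD _ _ _)]; exact hlt),
      pv_fold_incr _ _ _ hnn hq hlt, pv_count_pyRange _ _ _ _ hpos, List.countP_cons]
    by_cases hmem : q ∈ PySem.List.pyRange (x*2) (e+1) x
    · simp only [hmem, if_true, decide_true]
      push_cast; ring
    · simp only [hmem, if_false, decide_false]
      push_cast; ring

lemma pv_cntA_get (e : Int) (he : 0 ≤ e) (q : Int) (h0 : 0 ≤ q) (hq : q ≤ e) :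
    PySem.List.pyGetD (pvCntA e) q 0 = if 1 ≤ q then (pvTau q.toNat : Int) else 1 := by
  unfold pvCntA
  rw [pv_cntA_partial e _ _ _
      (fun x hx => (PySem.List.mem_pyRange_one.mp hx).1) h0
      (by rw [List.length_replicate]; omega),
    pv_getD_replicate _ _ _ h0, if_pos (by omega)]
  by_cases h1 : 1 ≤ q
  · rw [if_pos h1]
    set Q := q.toNat with hQdef
    have hQ1 : 1 ≤ Q := by omega
    have hQcast : (Q : Int) = q := by omega
    have hQe : Q ≤ e.toNat := by omega
    have hcongr : (PySem.List.pyRange 1 (e+1) 1).countP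
          (fun num => decide (q ∈ PySem.List.pyRange (num*2) (e+1) num))
        = (PySem.List.pyRange 1 (e+1) 1).countP
          (fun num => decide (num ∣ q ∧ 2*num ≤ q)) := by
      apply List.countP_congr
      intro num hnum
      have hnum' := PySem.List.mem_pyRange_one.mp hnum
      have hnpos : (0:Int) < num := by omega
      have hiff : (q ∈ PySem.List.pyRange (num*2) (e+1) num) ↔ (num ∣ q ∧ 2*num ≤ q) := by
        rw [PySem.List.mem_pyRange_iff_of_pos hnpos]
        constructor
        · rintro ⟨ha, _, hd⟩
          refine ⟨?_, by omega⟩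
          have hq' : q = (q - num*2) + num*2 := by ring
          rw [hq']
          exact dvd_add hd (dvd_mul_right num 2)
        · rintro ⟨hd, hle⟩
          exact ⟨by omega, by omega, dvd_sub hd (dvd_mul_right num 2)⟩
      simpa using hiff
    rw [hcongr, PySem.List.pyRange_one]
    have he1 : e + 1 - 1 = e := by ring
    rw [he1, List.countP_map]
    have hcongr2 : (List.range e.toNat).countP
          ((fun num => decide (num ∣ q ∧ 2*num ≤ q)) ∘ (fun k : Nat => 1 + (k:Int)))
        = (List.range e.toNat).countP (fun k => decide ((k+1) ∣ Q ∧ 2*(k+1) ≤ Q)) := by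
      apply List.countP_congr
      intro k _
      have hcast1 : (1 + (k:Int)) = ((k+1 : Nat) : Int) := by push_cast; ring
      have hiff : ((1 + (k:Int)) ∣ q ∧ 2*(1 + (k:Int)) ≤ q) ↔ ((k+1) ∣ Q ∧ 2*(k+1) ≤ Q) := by
        constructor
        · rintro ⟨hd, hle⟩
          rw [hcast1, ← hQcast] at hd
          exact ⟨Int.natCast_dvd_natCast.mp hd, by omega⟩
        · rintro ⟨hd, hle⟩
          refine ⟨?_, by omega⟩
          rw [hcast1, ← hQcast]
          exact Int.natCast_dvd_natCast.mpr hd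
      simpa using hiff
    rw [hcongr2, pv_countP_range]
    have himg : Q.properDivisors
        = ((Finset.range e.toNat).filter
            (fun k => (fun k => decide ((k+1) ∣ Q ∧ 2*(k+1) ≤ Q)) k = true)).image (· + 1) := by
      ext d
      simp only [Finset.mem_image, Finset.mem_filter, Finset.mem_range, decide_eq_true_eq,
        Nat.mem_properDivisors]
      constructor
      · rintro ⟨hdvd, hlt⟩
        have hd1 : 1 ≤ d := Nat.pos_of_dvd_of_pos hdvd (by omega)
        refine ⟨d - 1, ⟨by omega, ?_, ?_⟩, by omega⟩
        · rwa [Nat.sub_add_cancel hd1]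
        · rw [Nat.sub_add_cancel hd1, pv_two_mul_le_iff d Q hd1 hdvd hQ1]
          exact hlt
      · rintro ⟨k, ⟨hk, hdvd, hle⟩, rfl⟩
        exact ⟨hdvd, by rw [← pv_two_mul_le_iff (k+1) Q (by omega) hdvd hQ1]; exact hle⟩
    rw [pv_tau_eq_proper Q hQ1, himg,
      Finset.card_image_of_injective _ (fun a b h => by omega)]
    push_cast
    ring
  · rw [if_neg h1]
    have hq0 : q = 0 := by omega
    subst hq0
    have : (PySem.List.pyRange 1 (e+1) 1).countP
        (fun num => decide ((0:Int) ∈ PySem.List.pyRange (num*2) (e+1) num)) = 0 := by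
      apply List.countP_eq_zero.mpr
      intro num hnum
      have hnum' := PySem.List.mem_pyRange_one.mp hnum
      simp only [decide_eq_true_eq]
      intro hmem
      have := (PySem.List.mem_pyRange_iff_of_pos (by omega : (0:Int) < num) 0).mp hmem
      omega
    rw [this]
    simp

-- B's spf characterisation
lemma pv_spf_partial (e : Int) (he : 0 ≤ e) :
    ∀ (n : Nat) (t : Int), t = (n : Int) + 1 → t ≤ e → ∀ j, 0 ≤ j → j ≤ e →
    PySem.List.pyGetD
      ((PySem.List.pyRange 2 (t+1) 1).foldl
        (fun spf i => (PySem.List.pyRange i (e+1) i).foldl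
          (fun spf j => if PySem.List.pyGetD spf j 0 = 0 then PySem.List.pySetD spf j i else spf) spf)
        (List.replicate (e+1).toNat 0)) j 0
    = if 2 ≤ j ∧ (j.toNat.minFac : Int) ≤ t then (j.toNat.minFac : Int) else 0 := by
  intro n
  induction n with
  | zero =>
    intro t ht hte j hj0 hje
    rw [PySem.List.pyRange_one_eq_nil (by omega), List.foldl_nil,
      pv_getD_replicate _ _ _ hj0, if_pos (by omega)]
    symm
    rw [if_neg]
    rintro ⟨hj2, hmf⟩
    have h2 : 2 ≤ j.toNat.minFac := (Nat.minFac_prime (by omega : j.toNat ≠ 1)).two_le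
    omega
  | succ n ih =>
    intro t ht hte j hj0 hje
    have ht2 : (2:Int) ≤ t := by omega
    have hsplit : PySem.List.pyRange 2 (t+1) 1 = PySem.List.pyRange 2 t 1 ++ [t] :=
      PySem.List.pyRange_one_succ_right ht2
    rw [hsplit, List.foldl_append, List.foldl_cons, List.foldl_nil]
    have hlen : ∀ (L : List Int),
        ((L.foldl
          (fun spf i => (PySem.List.pyRange i (e+1) i).foldl
            (fun spf j => if PySem.List.pyGetD spf j 0 = 0 then PySem.List.pySetD spf j i else spf) spf)
          (List.replicate (e+1).toNat 0))).length = (e+1).toNat := by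
      intro L
      rw [pv_foldl_len _ (fun s i => pv_foldl_len _ (fun s' j => by
        split
        · exact PySem.List.length_pySetD _ _ _
        · rfl) _ s), List.length_replicate]
    have ihinst := ih (t-1) (by omega) (by omega)
    have hrw : t - 1 + 1 = t := by ring
    rw [hrw] at ihinst
    rw [pv_fold_mark t (by omega) _ _ _ (fun z hz => by
        have := (PySem.List.mem_pyRange_iff_of_pos (by omega : (0:Int) < t) z).mp hz
        omega) hj0 (by rw [hlen]; omega)]
    rw [ihinst j hj0 hje]
    set F := (j.toNat.minFac : Int) with hF
    have hmemiff : j ∈ PySem.List.pyRange t (e+1) t ↔ t ∣ j ∧ t ≤ j := by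
      rw [PySem.List.mem_pyRange_iff_of_pos (by omega : (0:Int) < t)]
      constructor
      · rintro ⟨h1, _, h3⟩
        refine ⟨?_, h1⟩
        have : j = (j - t) + t := by ring
        rw [this]
        exact dvd_add h3 (dvd_refl t)
      · rintro ⟨h1, h2⟩
        exact ⟨h2, by omega, dvd_sub h1 (dvd_refl t)⟩
    by_cases hj2 : 2 ≤ j
    · have hJ2 : 2 ≤ j.toNat := by omega
      have hF2 : 2 ≤ F := by
        have := (Nat.minFac_prime (by omega : j.toNat ≠ 1)).two_le
        simp only [hF]
        exact_mod_cast this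
      have hFdvd : F ∣ j := by
        have := Nat.minFac_dvd j.toNat
        have hcast : ((j.toNat.minFac : Nat) : Int) ∣ ((j.toNat : Nat) : Int) :=
          Int.natCast_dvd_natCast.mpr this
        simpa [hF, Int.toNat_of_nonneg hj0] using hcast
      by_cases hcond : F ≤ t - 1
      · have hprev : (if 2 ≤ j ∧ F ≤ t - 1 then F else 0) = F := if_pos ⟨hj2, hcond⟩
        rw [hprev, if_neg (fun h : F = 0 ∧ j ∈ PySem.List.pyRange t (e+1) t => by omega),
          if_pos ⟨hj2, by omega⟩]
      · have hprev : (if 2 ≤ j ∧ F ≤ t - 1 then F else 0) = 0 := if_neg (fun h => hcond h.2)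
        rw [hprev]
        by_cases hdvd : t ∣ j
        · have hmem : j ∈ PySem.List.pyRange t (e+1) t :=
            hmemiff.mpr ⟨hdvd, Int.le_of_dvd (by omega) hdvd⟩
          have hFle : F ≤ t := by
            have hdnat : t.toNat ∣ j.toNat := by
              have hc : ((t.toNat : Nat) : Int) ∣ ((j.toNat : Nat) : Int) := by
                rw [Int.toNat_of_nonneg (by omega : 0 ≤ t), Int.toNat_of_nonneg hj0]
                exact hdvd
              exact Int.natCast_dvd_natCast.mp hc
            have := Nat.minFac_le_of_dvd (by omega : 2 ≤ t.toNat) hdnat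
            simp only [hF]
            omega
          have hFt : F = t := by omega
          rw [if_pos (⟨rfl, hmem⟩ : (0:Int) = 0 ∧ j ∈ PySem.List.pyRange t (e+1) t),
            if_pos ⟨hj2, by omega⟩]
          exact hFt.symm
        · have hmem : j ∉ PySem.List.pyRange t (e+1) t := fun h => hdvd (hmemiff.mp h).1
          rw [if_neg (fun h : (0:Int) = 0 ∧ j ∈ PySem.List.pyRange t (e+1) t => hmem h.2)]
          symm
          rw [if_neg]
          rintro ⟨_, hFle⟩
          have hFt : F = t := by omega
          exact hdvd (hFt ▸ hFdvd)
    · have hprev : (if 2 ≤ j ∧ F ≤ t - 1 then F else 0) = 0 := if_neg (fun h => hj2 h.1)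
      have hmem : j ∉ PySem.List.pyRange t (e+1) t := by
        intro h
        have := (hmemiff.mp h).2
        omega
      rw [hprev, if_neg (fun h : (0:Int) = 0 ∧ j ∈ PySem.List.pyRange t (e+1) t => hmem h.2),
        if_neg (fun h => hj2 h.1)]

lemma pv_spf_get (e : Int) (he : 0 ≤ e) (j : Int) (h2 : 2 ≤ j) (hje : j ≤ e) :
    PySem.List.pyGetD (pvSpf e) j 0 = (j.toNat.minFac : Int) := by
  unfold pvSpf
  have he2 : 2 ≤ e := le_trans h2 hje
  have hpart := pv_spf_partial e he (e-1).toNat e (by omega) (le_refl e) j (by omega) hje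
  rw [hpart]
  have hmf : (j.toNat.minFac : Int) ≤ e := by
    have := Nat.minFac_le (show 0 < j.toNat by omega)
    omega
  rw [if_pos ⟨h2, hmf⟩]

-- the strip loop removes exactly the maximal power of p
lemma pv_strip_spec (p : Int) (hp : 2 ≤ p) :
    ∀ (v fuel : Nat) (k m : Int), 1 ≤ m → (p^v ∣ m) → ¬ (p^(v+1) ∣ m) → v ≤ fuel →
    pvStrip p fuel (k, m) = (k + (v : Int), m / p^v) := by
  intro v
  induction v with
  | zero =>
    intro fuel k m _ _ h1 _
    have hpm : ¬ p ∣ m := by simpa using h1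
    cases fuel with
    | zero => simp [pvStrip]
    | succ f =>
      rw [pvStrip, if_neg (fun h => hpm ((PySem.Int.mod_eq_zero_iff_dvd m p).mp h))]
      simp
  | succ v ih =>
    intro fuel k m hm hdvd hndvd hfuel
    cases fuel with
    | zero => omega
    | succ f =>
      have hpdvd : p ∣ m := dvd_trans (dvd_pow_self p (Nat.succ_ne_zero v)) hdvd
      rw [pvStrip, if_pos ((PySem.Int.mod_eq_zero_iff_dvd m p).mpr hpdvd),
        PySem.Int.floordiv_eq_ediv_of_pos (by omega)]
      obtain ⟨t, rfl⟩ : ∃ t, m = p^(v+1) * t := hdvd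
      have hp0 : p ≠ 0 := by omega
      have hppow : (0:Int) < p^(v+1) := pow_pos (by omega) _
      have ht1 : 1 ≤ t := by nlinarith
      have hdiv1 : p^(v+1) * t / p = p^v * t := by
        rw [pow_succ, mul_comm (p^v) p, mul_assoc]
        exact Int.mul_ediv_cancel_left _ hp0
      rw [hdiv1]
      have hm' : (1:Int) ≤ p^v * t := by nlinarith [pow_pos (by omega : (0:Int) < p) v]
      have hdvd' : p^v ∣ p^v * t := dvd_mul_right _ _
      have hndvd' : ¬ p^(v+1) ∣ p^v * t := by
        rintro ⟨u, hu⟩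
        have hpow : (p:Int)^v ≠ 0 := by positivity
        have ht : t = p * u := by
          have h2 : p^v * t = p^v * (p * u) := by rw [hu]; ring
          exact mul_left_cancel₀ hpow h2
        exact hndvd ⟨u, by rw [ht]; ring⟩
      rw [ih f (k+1) (p^v*t) hm' hdvd' hndvd' (by omega)]
      rw [Int.mul_ediv_cancel_left _ (by positivity : (p:Int)^v ≠ 0),
        Int.mul_ediv_cancel_left _ (by positivity : (p:Int)^(v+1) ≠ 0)]
      simp only [Prod.mk.injEq]
      exact ⟨by push_cast; ring, trivial⟩

-- the factor loop computes the divisor count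
lemma pv_fact_spec (e : Int) (he : 0 ≤ e) :
    ∀ (fuel : Nat) (m c : Int), 1 ≤ m → m ≤ e → m.toNat ≤ fuel →
    pvFact (pvSpf e) fuel m c = c * (pvTau m.toNat : Int) := by
  intro fuel
  induction fuel with
  | zero => intro m c hm hme hfuel; omega
  | succ f ih =>
    intro m c hm hme hfuel
    rcases eq_or_lt_of_le hm with h1 | h1
    · rw [pvFact, if_neg (by omega)]
      have hm1 : m.toNat = 1 := by omega
      rw [hm1]
      have : pvTau 1 = 1 := by simp [pvTau]
      rw [this]
      simp
    · -- 2 ≤ m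
      have hM2 : 2 ≤ m.toNat := by omega
      have hM0 : m.toNat ≠ 0 := by omega
      set M := m.toNat with hMdef
      have hmM : m = (M : Int) := by omega
      set P := M.minFac with hPdef
      have hp : P.Prime := Nat.minFac_prime (by omega)
      have hP2 : 2 ≤ P := hp.two_le
      set v := M.factorization P with hvdef
      have hv1 : 1 ≤ v := hp.factorization_pos_of_dvd hM0 (Nat.minFac_dvd M)
      obtain ⟨w, hw⟩ : P ^ v ∣ M := Nat.ordProj_dvd M P
      have hPv1 : 1 ≤ P ^ v := Nat.one_le_pow _ _ (by omega)
      have hPvP : P ≤ P ^ v := by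
        calc P = P ^ 1 := (pow_one P).symm
        _ ≤ P ^ v := Nat.pow_le_pow_right (by omega) hv1
      have hw1 : 1 ≤ w := by
        rcases Nat.eq_zero_or_pos w with h | h
        · rw [h, mul_zero] at hw
          omega
        · exact h
      have hwltM : w < M := by
        have h2w : 2 * w ≤ M := by
          calc 2 * w ≤ P ^ v * w := Nat.mul_le_mul_right w (by omega)
          _ = M := hw.symm
        omega
      have hdvdZ : ((P:Int))^v ∣ m := by
        rw [hmM]
        exact_mod_cast Int.natCast_dvd_natCast.mpr (Nat.ordProj_dvd M P)
      have hndvdZ : ¬ ((P:Int))^(v+1) ∣ m := by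
        intro h
        apply Nat.pow_succ_factorization_not_dvd hM0 hp
        have hc : ((P^(v+1) : Nat) : Int) ∣ ((M : Nat) : Int) := by
          push_cast
          rwa [← hmM]
        exact_mod_cast hc
      have hvle : v ≤ f + 1 := by
        have h1 : v < 2 ^ v := Nat.lt_two_pow_self
        have h2 : 2 ^ v ≤ P ^ v := Nat.pow_le_pow_left (by omega) v
        have h3 : P ^ v ≤ M := Nat.ordProj_le P hM0
        omega
      rw [pvFact, if_pos (by omega : (1:Int) < m),
        pv_spf_get e he m (by omega) hme, ← hMdef, ← hPdef,
        pv_strip_spec (P:Int) (by exact_mod_cast hP2) v (f+1) 0 m hm hdvdZ hndvdZ hvle]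
      have hmdiv : m / ((P:Int))^v = (w : Int) := by
        rw [hmM, hw]
        push_cast
        rw [mul_comm]
        exact Int.mul_ediv_cancel _ (by positivity)
      simp only [hmdiv]
      rw [ih (w : Int) (c * (0 + (v:Int) + 1)) (by exact_mod_cast hw1)
        (by calc (w:Int) ≤ (M:Int) := by exact_mod_cast le_of_lt hwltM
            _ = m := hmM.symm
            _ ≤ e := hme)
        (by
          have hwle : w ≤ f := by omega
          simpa using hwle)]
      have hcop : Nat.Coprime (P^v) w := by
        have hordc : w = M / P ^ v := by
          rw [hw, Nat.mul_div_cancel_left w (by omega : 0 < P ^ v)]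
        rw [hordc]
        exact (Nat.coprime_ordCompl hp hM0).pow_left v
      have htau : pvTau M = (v + 1) * pvTau w := by
        calc pvTau M = pvTau (P^v * w) := by rw [← hw]
        _ = pvTau (P^v) * pvTau w := Nat.Coprime.card_divisors_mul hcop
        _ = (v+1) * pvTau w := by
            unfold pvTau
            rw [Nat.divisors_prime_pow hp, Finset.card_map, Finset.card_range]
      have hwt : ((w:Int)).toNat = w := by omega
      rw [hwt, htau]
      push_cast
      ring

lemma pv_cntB_len (e : Int) : (pvCntB e).length = (e+1).toNat := by
  unfold pvCntB
  rw [pv_foldl_len _ (fun s n => PySem.List.length_pySetD _ _ _), List.length_replicate]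

lemma pv_cntB_get (e : Int) (he : 0 ≤ e) (q : Int) (h0 : 0 ≤ q) (hq : q ≤ e) :
    PySem.List.pyGetD (pvCntB e) q 0 = if 1 ≤ q then (pvTau q.toNat : Int) else 1 := by
  unfold pvCntB
  rw [pv_fold_setf _ _ _ _ (fun x hx => by
      have hx' := PySem.List.mem_pyRange_one.mp hx
      have hlen : ((List.replicate (e+1).toNat (1:Int)).length : Int) = (e+1).toNat := by
        rw [List.length_replicate]
      constructor
      · omega
      · rw [hlen]; omega) h0]
  by_cases h2 : 2 ≤ q
  · rw [if_pos (PySem.List.mem_pyRange_one.mpr ⟨h2, by omega⟩), if_pos (by omega)]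
    rw [pv_fact_spec e he q.toNat q 1 (by omega) hq (le_refl _)]
    ring
  · rw [if_neg (fun hmem => by
      have := PySem.List.mem_pyRange_one.mp hmem
      omega)]
    rw [pv_getD_replicate _ _ _ h0, if_pos (by omega)]
    by_cases h1 : 1 ≤ q
    · rw [if_pos h1]
      have : q.toNat = 1 := by omega
      rw [this]
      have ht : pvTau 1 = 1 := by simp [pvTau]
      rw [ht]
      simp
    · rw [if_neg h1]

lemma pv_cnt_eq (e : Int) (he : 0 ≤ e) : pvCntA e = pvCntB e := by
  apply List.ext_getElem (by rw [pv_cntA_len, pv_cntB_len])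
  intro i h1 h2
  have hiN : i < (e+1).toNat := by rw [← pv_cntA_len e]; exact h1
  have hie : (i : Int) ≤ e := by omega
  have gA : (pvCntA e)[i] = PySem.List.pyGetD (pvCntA e) (i : Int) 0 := by
    rw [PySem.List.pyGetD_natCast, List.getD_eq_getElem _ _ h1]
  have gB : (pvCntB e)[i] = PySem.List.pyGetD (pvCntB e) (i : Int) 0 := by
    rw [PySem.List.pyGetD_natCast, List.getD_eq_getElem _ _ h2]
  rw [gA, gB, pv_cntA_get e he _ (by positivity) hie, pv_cntB_get e he _ (by positivity) hie]

-- the two dp phases agree on any cnt table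
lemma pv_dp_fold (cnt : List Int) :
    ∀ (n : Nat) (a : Int) (dp : List Int) (best : Int), a = (n : Int) →
      a + 1 < (dp.length : Int) →
      PySem.List.pyGetD dp (a+1) 0 = best →
      (PySem.List.pyRange a 0 (-1)).foldl
        (fun dp i =>
          if PySem.List.pyGetD cnt i 0 ≥ PySem.List.pyGetD cnt (PySem.List.pyGetD dp (i+1) 0) 0 then
            PySem.List.pySetD dp i i
          else PySem.List.pySetD dp i (PySem.List.pyGetD dp (i+1) 0)) dp
      = ((PySem.List.pyRange a 0 (-1)).foldl
          (fun bd i =>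
            let best := if PySem.List.pyGetD cnt i 0 ≥ PySem.List.pyGetD cnt bd.1 0 then i else bd.1
            (best, PySem.List.pySetD bd.2 i best)) (best, dp)).2 := by
  intro n
  induction n with
  | zero =>
    intro a dp best ha _ _
    subst ha
    rw [PySem.List.pyRange_neg_one_eq_nil (by omega)]
    simp
  | succ n ih =>
    intro a dp best ha hlen hbest
    have ha0 : (0:Int) < a := by omega
    rw [PySem.List.pyRange_neg_one_cons ha0, List.foldl_cons, List.foldl_cons]
    rw [hbest]
    have hstep : (if PySem.List.pyGetD cnt a 0 ≥ PySem.List.pyGetD cnt best 0 then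
          PySem.List.pySetD dp a a
        else PySem.List.pySetD dp a best)
        = PySem.List.pySetD dp a
            (if PySem.List.pyGetD cnt a 0 ≥ PySem.List.pyGetD cnt best 0 then a else best) := by
      split <;> rfl
    rw [hstep]
    set best' := if PySem.List.pyGetD cnt a 0 ≥ PySem.List.pyGetD cnt best 0 then a else best with hbd
    refine ih (a-1) _ best' (by omega) ?_ ?_
    · rw [PySem.List.length_pySetD]; omega
    · have : a - 1 + 1 = a := by ring
      rw [this, pv_getD_setD dp a a best' (by omega) (by omega), if_pos ⟨rfl, by omega⟩]

lemma pv_dp_eq (e : Int) (he : 0 ≤ e) (cnt : List Int) :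
    pvDpA e cnt = (pvDpB e cnt).2 := by
  unfold pvDpA pvDpB
  rcases lt_or_ge e 1 with h1 | h1
  · rw [PySem.List.pyRange_neg_one_eq_nil (by omega)]
    simp
  · refine pv_dp_fold cnt (e-1).toNat (e-1) _ e (by omega) ?_ ?_
    · rw [PySem.List.length_pySetD, List.length_replicate]
      omega
    · have : e - 1 + 1 = e := by ring
      rw [this, pv_getD_setD _ e e e he he, if_pos ⟨rfl, by rw [List.length_replicate]; omega⟩]

-- ===== VERDICT (by name: the statement is the Claim_ definition above) =====
theorem solution_spec : Claim_equal_solution := by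
  intro e starts _ hpre
  unfold Spec_solution solution solution_alt
  rw [PySem.List.foldl_append_singleton_eq_map]
  rw [pv_cnt_eq e hpre.1, pv_dp_eq e hpre.1]
  simp
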